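-- pv_equiv track=rewrite | github.com/HarrisonTotty/positroid-structure-relu-networks | src/positroid/matroid/plabic.py | reduced_word_for_permutation
-- ===== SOURCE A (Python) =====
-- def reduced_word_for_permutation(perm: list[int]) -> list[int]:
--     """Decompose a permutation into adjacent transpositions via bubble sort.
--
--     Returns a reduced word [j_1, j_2, ...] where s_{j_i} swaps positions
--     j_i and j_i+1. Applying left-to-right reconstructs the permutation.
--     The length equals the number of inversions.
--     """
--     n = len(perm)
--     arr = list(perm)
--     word: list[int] = []
--
--     # Bubble sort: each swap records a transposition
--     # This sorts perm -> identity, so we reverse to get identity -> perm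
--     changed = True
--     while changed:
--         changed = False
--         for i in range(n - 1):
--             if arr[i] > arr[i + 1]:
--                 arr[i], arr[i + 1] = arr[i + 1], arr[i]
--                 word.append(i)
--                 changed = True
--
--     word.reverse()
--     return word
-- ===== SOURCE B (Python) =====
-- def reduced_word_for_permutation(perm: list[int]) -> list[int]:
--     """Carry-max sweep over a shrinking segment: each pass threads the running
--     maximum through the unsettled segment, rebuilding it into a fresh list that
--     no longer contains the settled maximum; no in-place swaps, no 'changed'
--     flag, and the settled tail is never stored or re-scanned."""
--     word: list[int] = []
--     seg = list(perm)
--     while len(seg) > 1: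
--         out: list[int] = []
--         sw: list[int] = []
--         carry = seg[0]
--         for pos, b in enumerate(seg[1:]):
--             if carry > b:
--                 out.append(b)
--                 sw.append(pos)
--             else:
--                 out.append(carry)
--                 carry = b
--         # carry is the maximum of seg: settled, dropped from the data
--         word += sw
--         seg = out
--     word.reverse()
--     return word
-- ===== Notes on version B (the rewrite author's own statement) =====
-- stated objective: faster
-- what changed: A's while-until-no-swap loop of full-width in-place bubble passes over the whole array is replaced by carry-the-maximum sweeps over a shrinking segment: each pass threads the running maximum through the unsettled elements and rebuilds them into a fresh list without the settled maximum, so the sorted tail is never stored or re-scanned (about half the comparisons) and no 'changed' flag exists.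
import Mathlib
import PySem

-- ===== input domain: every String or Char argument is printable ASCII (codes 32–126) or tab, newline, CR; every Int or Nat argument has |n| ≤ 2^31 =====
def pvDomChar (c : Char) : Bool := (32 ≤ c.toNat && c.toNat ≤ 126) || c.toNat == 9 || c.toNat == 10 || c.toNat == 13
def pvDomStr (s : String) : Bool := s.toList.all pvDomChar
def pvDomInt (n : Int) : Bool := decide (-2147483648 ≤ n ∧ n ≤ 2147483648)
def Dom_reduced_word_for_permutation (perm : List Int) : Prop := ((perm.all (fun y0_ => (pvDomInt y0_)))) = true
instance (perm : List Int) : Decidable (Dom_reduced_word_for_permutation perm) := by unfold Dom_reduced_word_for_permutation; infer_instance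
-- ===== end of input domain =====

-- B replaces A's while-until-no-swap loop of in-place full-width bubble passes by
-- carry-the-maximum sweeps rebuilding a shrinking segment (alternative decomposition).

-- ===== PORT A =====
-- one 'for i in range(n-1)' bubble pass over adjacent pairs, carrying the absolute
-- index i; returns (arr after the pass, indices appended this pass, changed flag)
def pvPassA (i : Nat) : List Int → List Int × List Int × Bool
  | a :: b :: t =>
      if a > b then
        let r := pvPassA (i+1) (a :: t)
        (b :: r.1, (i : Int) :: r.2.1, true)
      else
        let r := pvPassA (i+1) (b :: t)
        (a :: r.1, r.2.1, r.2.2)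
  | l => (l, [], false)
  termination_by l => l.length
  decreasing_by all_goals simp

-- 'while changed:' — fuel n+1 is enough: bubble sort makes at most n passes incl. the final no-swap pass
def pvLoopA : Nat → List Int → List Int → List Int
  | 0, _, word => word
  | fuel+1, arr, word =>
      let r := pvPassA 0 arr
      if r.2.2 then pvLoopA fuel r.1 (word ++ r.2.1) else word

def reduced_word_for_permutation (perm : List Int) : List Int :=
  (pvLoopA (perm.length + 1) perm []).reverse

-- ===== PORT B =====
-- the inner 'for pos, b in enumerate(seg[1:])' loop: thread the running maximum
-- 'carry' through the segment, appending to the accumulators out and sw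
def pvSweep (out sw : List Int) (carry : Int) (pos : Nat) : List Int → List Int × List Int
  | [] => (out, sw)
  | b :: t =>
      if carry > b then pvSweep (out ++ [b]) (sw ++ [(pos : Int)]) carry (pos+1) t
      else pvSweep (out ++ [carry]) sw b (pos+1) t

-- length fact cited by pvSettleB's termination proof
theorem pvSweep_len : ∀ (t out sw : List Int) (c : Int) (i : Nat),
    (pvSweep out sw c i t).1.length = out.length + t.length := by
  intro t
  induction t with
  | nil => intro out sw c i; simp [pvSweep]
  | cons b t ih =>
    intro out sw c i
    by_cases h : c > b <;> simp [pvSweep, h, ih] <;> omega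

-- the 'while len(seg) > 1' loop: one sweep, append its swaps, shrink to out
def pvSettleB : List Int → List Int
  | [] => []
  | [_] => []
  | c :: b :: t =>
      let r := pvSweep [] [] c 0 (b :: t)
      r.2 ++ pvSettleB r.1
  termination_by l => l.length
  decreasing_by simp [pvSweep_len]

def reduced_word_for_permutation_alt (perm : List Int) : List Int :=
  (pvSettleB perm).reverse

-- ===== PRECONDITION & SPEC =====
def Spec_reduced_word_for_permutation (perm : List Int) (out : List Int) : Prop := out = reduced_word_for_permutation_alt perm
instance (perm : List Int) (out : List Int) : Decidable (Spec_reduced_word_for_permutation perm out) := by unfold Spec_reduced_word_for_permutation; infer_instance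

-- ===== CLAIM (what is proved, stated in full; the proofs are below) =====
def Claim_equal_reduced_word_for_permutation : Prop := ∀ (perm : List Int), Dom_reduced_word_for_permutation perm → Spec_reduced_word_for_permutation perm (reduced_word_for_permutation perm)

-- ===== LEMMAS AND PROOFS =====

-- a non-accumulator view of one sweep, used only by the proofs: the new segment is
-- built around the recursive call and still carries the settled maximum at its end
def pvOnePass (carry : Int) (pos : Nat) : List Int → List Int × List Int
  | [] => ([carry], [])
  | b :: t =>
      if carry > b then
        let r := pvOnePass carry (pos+1) t
        (b :: r.1, (pos : Int) :: r.2)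
      else
        let r := pvOnePass b (pos+1) t
        (carry :: r.1, r.2)

theorem pvOnePass_len : ∀ (t : List Int) (c : Int) (i : Nat), (pvOnePass c i t).1.length = t.length + 1 := by
  intro t
  induction t with
  | nil => intro c i; simp [pvOnePass]
  | cons b t ih =>
    intro c i
    by_cases h : c > b <;> simp [pvOnePass, h, ih]

theorem pvOnePass_ne_nil (t : List Int) (c : Int) (i : Nat) : (pvOnePass c i t).1 ≠ [] := by
  intro h
  have := pvOnePass_len t c i
  rw [h] at this
  simp at this

-- the sweep is the accumulator form of pvOnePass with the final carry dropped
theorem pvSweep_eq : ∀ (t out sw : List Int) (c : Int) (i : Nat),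
    pvSweep out sw c i t = (out ++ (pvOnePass c i t).1.dropLast, sw ++ (pvOnePass c i t).2) := by
  intro t
  induction t with
  | nil => intro out sw c i; simp [pvSweep, pvOnePass]
  | cons b t ih =>
    intro out sw c i
    by_cases h : c > b
    · have hne := pvOnePass_ne_nil t c (i+1)
      simp [pvSweep, pvOnePass, h, ih, List.dropLast_cons_of_ne_nil hne]
    · have hne := pvOnePass_ne_nil t b (i+1)
      simp [pvSweep, pvOnePass, h, ih, List.dropLast_cons_of_ne_nil hne]

-- one unfolding of pvSettleB through the sweep/pvOnePass bridge
theorem pvSettleB_cons (c b : Int) (t : List Int) :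
    pvSettleB (c :: b :: t) = (pvOnePass c 0 (b :: t)).2 ++ pvSettleB ((pvOnePass c 0 (b :: t)).1.dropLast) := by
  simp only [pvSettleB]
  rw [pvSweep_eq]
  simp


-- the new segment is u ++ [m]: m dominates u and u ++ [m] is a permutation of the input
theorem pvOnePass_decomp : ∀ (t : List Int) (c : Int) (i : Nat),
    ∃ u m, (pvOnePass c i t).1 = u ++ [m] ∧ (∀ x ∈ u, x ≤ m) ∧ (c :: t).Perm (u ++ [m]) := by
  intro t
  induction t with
  | nil => intro c i; exact ⟨[], c, by simp [pvOnePass]⟩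
  | cons b t ih =>
    intro c i
    by_cases h : c > b
    · obtain ⟨u, m, e, hd, hp⟩ := ih c (i+1)
      have hcm : c ≤ m := by
        have : c ∈ u ++ [m] := hp.subset (by simp)
        rcases List.mem_append.mp this with h' | h'
        · exact hd c h'
        · simp at h'; omega
      refine ⟨b :: u, m, by simp [pvOnePass, h, e], ?_, ?_⟩
      · intro x hx
        rcases List.mem_cons.mp hx with rfl | hx
        · omega
        · exact hd x hx
      · simpa using (List.Perm.swap b c t).trans (hp.cons b)
    · obtain ⟨u, m, e, hd, hp⟩ := ih b (i+1)
      have hbm : b ≤ m := by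
        have : b ∈ u ++ [m] := hp.subset (by simp)
        rcases List.mem_append.mp this with h' | h'
        · exact hd b h'
        · simp at h'; omega
      refine ⟨c :: u, m, by simp [pvOnePass, h, e], ?_, ?_⟩
      · intro x hx
        rcases List.mem_cons.mp hx with rfl | hx
        · omega
        · exact hd x hx
      · simpa using hp.cons c

-- a pass over an already-sorted list does nothing
theorem pvPassA_chain : ∀ (l : List Int) (i : Nat), List.IsChain (· ≤ ·) l → pvPassA i l = (l, [], false) := by
  intro l
  induction l with
  | nil => intro i _; simp [pvPassA]
  | cons a t ih =>
    intro i h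
    match t with
    | [] => simp [pvPassA]
    | b :: t' =>
      rw [List.isChain_cons] at h
      have hnb : ¬ a > b := not_lt.mpr (h.1 b rfl)
      simp [pvPassA, hnb, ih (i+1) h.2]

theorem pvOnePass_chain : ∀ (t : List Int) (c : Int) (i : Nat),
    List.IsChain (· ≤ ·) (c :: t) → pvOnePass c i t = (c :: t, []) := by
  intro t
  induction t with
  | nil => intro c i _; simp [pvOnePass]
  | cons b t ih =>
    intro c i h
    rw [List.isChain_cons] at h
    have hnb : ¬ c > b := not_lt.mpr (h.1 b rfl)
    simp [pvOnePass, hnb, ih b (i+1) h.2]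

theorem pvOnePass_noswap_chain : ∀ (t : List Int) (c : Int) (i : Nat),
    (pvOnePass c i t).2 = [] → List.IsChain (· ≤ ·) (c :: t) := by
  intro t
  induction t with
  | nil => intro c i _; exact List.isChain_singleton c
  | cons b t ih =>
    intro c i hw
    by_cases h : c > b
    · simp [pvOnePass, h] at hw
    · have := ih b (i+1) (by simpa [pvOnePass, h] using hw)
      rw [List.isChain_cons]
      exact ⟨fun y hy => by simpa using (show b = y by simpa using hy) ▸ not_lt.mp h, this⟩

theorem pvSettleB_chain : ∀ (n : Nat) (l : List Int), l.length ≤ n → List.IsChain (· ≤ ·) l → pvSettleB l = [] := by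
  intro n
  induction n with
  | zero =>
    intro l hl _
    match l with
    | [] => simp [pvSettleB]
  | succ n ih =>
    intro l hl h
    match l with
    | [] => simp [pvSettleB]
    | [_] => simp [pvSettleB]
    | c :: b :: t =>
      rw [pvSettleB_cons, pvOnePass_chain (b :: t) c 0 h]
      simp only [List.nil_append]
      refine ih _ ?_ ?_
      · simp at hl ⊢; omega
      · have : (c :: b :: t).dropLast.Sublist (c :: b :: t) := List.dropLast_sublist _
        exact h.sublist this

-- A's full pass over the segment followed by the settled tail equals B's pass over the
-- segment alone: the final carry crosses the dominating sorted tail without swapping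
theorem pvPass_split : ∀ (t : List Int) (c : Int) (i : Nat) (tail : List Int),
    List.IsChain (· ≤ ·) tail → (∀ x ∈ c :: t, ∀ y ∈ tail, x ≤ y) →
    ∀ u m, (pvOnePass c i t).1 = u ++ [m] →
    pvPassA i (c :: t ++ tail) = (u ++ m :: tail, (pvOnePass c i t).2, !(pvOnePass c i t).2.isEmpty) := by
  intro t
  induction t with
  | nil =>
    intro c i tail hch hdom u m he
    simp only [pvOnePass] at he
    have hu : u = [] := by
      cases u with
      | nil => rfl
      | cons x u' =>
        have := congrArg List.length he
        simp at this
    subst hu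
    have hm : m = c := by simpa using he.symm
    subst hm
    have hfull : List.IsChain (· ≤ ·) (m :: tail) := by
      rw [List.isChain_cons]
      exact ⟨fun y hy => hdom m (by simp) y (List.mem_of_mem_head? hy), hch⟩
    simpa [pvOnePass] using pvPassA_chain (m :: tail) i hfull
  | cons b t ih =>
    intro c i tail hch hdom u m he
    by_cases h : c > b
    · simp only [pvOnePass, if_pos h] at he
      obtain ⟨u₀, m₀, he0, -, -⟩ := pvOnePass_decomp t c (i+1)
      rw [he0] at he
      have h1 : (b :: u₀) ++ [m₀] = u ++ [m] := by simpa using he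
      obtain ⟨h2, h3⟩ := List.append_inj' h1 (by simp)
      have hm : m₀ = m := by simpa using h3
      subst h2; subst hm
      have hdom' : ∀ x ∈ c :: t, ∀ y ∈ tail, x ≤ y := by
        intro x hx y hy
        exact hdom x (by rcases List.mem_cons.mp hx with rfl | hx <;> simp [hx]) y hy
      have hih := ih c (i+1) tail hch hdom' u₀ m₀ he0
      simp only [pvPassA, pvOnePass, if_pos h, List.cons_append]
      rw [List.cons_append] at hih
      simp [hih]
    · simp only [pvOnePass, if_neg h] at he
      obtain ⟨u₀, m₀, he0, -, -⟩ := pvOnePass_decomp t b (i+1)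
      rw [he0] at he
      have h1 : (c :: u₀) ++ [m₀] = u ++ [m] := by simpa using he
      obtain ⟨h2, h3⟩ := List.append_inj' h1 (by simp)
      have hm : m₀ = m := by simpa using h3
      subst h2; subst hm
      have hdom' : ∀ x ∈ b :: t, ∀ y ∈ tail, x ≤ y := by
        intro x hx y hy
        exact hdom x (by rcases List.mem_cons.mp hx with rfl | hx <;> simp [hx]) y hy
      have hih := ih b (i+1) tail hch hdom' u₀ m₀ he0
      simp only [pvPassA, pvOnePass, if_neg h, List.cons_append]
      rw [List.cons_append] at hih
      simp [hih]

theorem pvLoopA_acc : ∀ (fuel : Nat) (arr w : List Int), pvLoopA fuel arr w = w ++ pvLoopA fuel arr [] := by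
  intro fuel
  induction fuel with
  | zero => intro arr w; simp [pvLoopA]
  | succ fuel ih =>
    intro arr w
    simp only [pvLoopA]
    by_cases hc : (pvPassA 0 arr).2.2
    · simp only [hc, if_true]
      rw [ih _ (w ++ _), ih _ ([] ++ _)]
      simp
    · simp [hc]

-- core: A's fueled while-loop over segment ++ settled tail computes B's settle of the segment
theorem pvCore : ∀ (fuel : Nat) (seg tail : List Int), seg.length ≤ fuel →
    List.IsChain (· ≤ ·) tail → (∀ x ∈ seg, ∀ y ∈ tail, x ≤ y) →
    pvLoopA fuel (seg ++ tail) [] = pvSettleB seg := by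
  intro fuel
  induction fuel with
  | zero =>
    intro seg tail hl _ _
    match seg with
    | [] => simp [pvLoopA, pvSettleB]
  | succ fuel ih =>
    intro seg tail hl hch hdom
    match seg with
    | [] =>
      simp only [pvLoopA, List.nil_append, pvSettleB]
      rw [pvPassA_chain tail 0 hch]
      simp
    | [a] =>
      have hfull : List.IsChain (· ≤ ·) (a :: tail) := by
        rw [List.isChain_cons]
        exact ⟨fun y hy => hdom a (by simp) y (List.mem_of_mem_head? hy), hch⟩
      simp only [pvLoopA, List.cons_append, List.nil_append, pvSettleB]
      rw [pvPassA_chain (a :: tail) 0 hfull]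
      simp
    | c :: b :: t =>
      obtain ⟨u, m, he, hd, hp⟩ := pvOnePass_decomp (b :: t) c 0
      have hsplit := pvPass_split (b :: t) c 0 tail hch hdom u m he
      simp only [pvLoopA, List.cons_append] at hsplit ⊢
      rw [hsplit]
      by_cases hw : (pvOnePass c 0 (b :: t)).2 = []
      · have hchseg : List.IsChain (· ≤ ·) (c :: b :: t) := pvOnePass_noswap_chain (b :: t) c 0 hw
        simp only [hw, List.isEmpty_nil, Bool.not_true]
        exact (pvSettleB_chain (t.length + 2) (c :: b :: t) (by simp) hchseg).symm
      · have hflag : (pvOnePass c 0 (b :: t)).2.isEmpty = false := by simpa [List.isEmpty_iff] using hw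
        simp only [hflag, Bool.not_false, if_true, List.nil_append]
        rw [pvLoopA_acc]
        have hulen : u.length = t.length + 1 := by
          have := pvOnePass_len (b :: t) c 0
          rw [he] at this; simp at this ⊢; omega
        have hmem : ∀ x ∈ u ++ [m], x ∈ c :: b :: t := fun x hx => hp.symm.subset hx
        have hch' : List.IsChain (· ≤ ·) (m :: tail) := by
          rw [List.isChain_cons]
          exact ⟨fun y hy => hdom m (hmem m (by simp)) y (List.mem_of_mem_head? hy), hch⟩
        have hdom' : ∀ x ∈ u, ∀ y ∈ m :: tail, x ≤ y := by
          intro x hx y hy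
          rcases List.mem_cons.mp hy with rfl | hy
          · exact hd x hx
          · exact hdom x (hmem x (by simp [hx])) y hy
        have hrec := ih u (m :: tail) (by simp at hl; omega) hch' hdom'
        rw [hrec, pvSettleB_cons, he]
        simp

-- ===== VERDICT (by name: the statement is the Claim_ definition above) =====
theorem reduced_word_for_permutation_spec : Claim_equal_reduced_word_for_permutation := by
  intro perm _
  unfold Spec_reduced_word_for_permutation reduced_word_for_permutation reduced_word_for_permutation_alt
  have := pvCore (perm.length + 1) perm [] (by omega) List.isChain_nil (by simp)
  rw [List.append_nil] at this
  rw [this]
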